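-- pv_equiv track=rewrite | github.com/HinalJ/adventOfCode2023 | src/day5/src/almanac.py | update_the_range
-- ===== SOURCE A (Python) =====
-- def update_the_range(source_range, dest_range_maps):
--     updated_source_range = {}
--     dd, ds, step = dest_range_maps
--
--     for x, y in source_range.keys():
--         if x >= ds + step or y <= ds:
--             updated_source_range.update({(x, y): source_range.get((x, y), 0)})
--         elif ds <= x and ds+step >= y:
--             updated_source_range.update({(x, y): dd-ds})
--         else:
--             if x < ds <= y <= ds+step:
--                 updated_source_range.update({(x, ds): source_range.get((x, y), 0)})
--                 updated_source_range.update({(ds, y): dd-ds})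
--             elif ds <= x < ds+step <= y:
--                 updated_source_range.update({(x, ds+step): dd-ds})
--                 updated_source_range.update({(ds+step, y): source_range.get((x, y), 0)})
--             else:  # x < ds < ds+step < y
--                 updated_source_range.update({(x, ds): source_range.get((x, y), 0)})
--                 updated_source_range.update({(ds, ds+step): dd-ds})
--                 updated_source_range.update({(ds+step, y): source_range.get((x, y), 0)})
--
--     return updated_source_range
-- ===== SOURCE B (Python) =====
-- def update_the_range(source_range, dest_range_maps):
--     dd, ds, step = dest_range_maps
--     updated = {}
--     for (x, y), v in source_range.items():
--         if y <= ds or ds + step <= x: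
--             updated[(x, y)] = v
--             continue
--         cuts = [x] + [p for p in (ds, ds + step) if x < p < y] + [y]
--         for a, b in zip(cuts, cuts[1:]):
--             updated[(a, b)] = dd - ds if ds <= a and b <= ds + step else v
--     return updated
-- ===== Notes on version B (the rewrite author's own statement) =====
-- stated objective: alternative
-- what changed: B replaces A's six-branch case analysis over overlap shapes with a two-stage, data-driven split: it first generates the list of cut points of the interval (its endpoints plus whichever mapping boundaries fall strictly inside), then zips adjacent cut points into segments and classifies each segment uniformly by whether it lies inside the mapping range.
import Mathlib
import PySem

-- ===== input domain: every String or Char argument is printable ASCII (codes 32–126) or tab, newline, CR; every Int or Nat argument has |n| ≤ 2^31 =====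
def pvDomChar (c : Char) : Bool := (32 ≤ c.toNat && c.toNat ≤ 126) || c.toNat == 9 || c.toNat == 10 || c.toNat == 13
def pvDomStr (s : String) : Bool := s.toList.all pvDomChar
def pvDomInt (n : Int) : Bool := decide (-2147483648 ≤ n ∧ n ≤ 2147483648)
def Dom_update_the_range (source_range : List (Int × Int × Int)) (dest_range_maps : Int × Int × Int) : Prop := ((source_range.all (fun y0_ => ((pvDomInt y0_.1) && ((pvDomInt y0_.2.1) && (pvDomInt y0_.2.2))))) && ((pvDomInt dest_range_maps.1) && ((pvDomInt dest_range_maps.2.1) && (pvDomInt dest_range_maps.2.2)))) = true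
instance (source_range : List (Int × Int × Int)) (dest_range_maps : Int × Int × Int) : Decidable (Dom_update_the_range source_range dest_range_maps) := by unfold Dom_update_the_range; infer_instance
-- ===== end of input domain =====

-- B replaces A's six-branch overlap case analysis with a two-stage split: generate the interval's cut points, then classify each adjacent segment uniformly (alternative decomposition, same cost).


-- ===== PORT A =====
def update_the_range (source_range : List (Int × Int × Int)) (dest_range_maps : Int × Int × Int) : List (Int × Int × Int) :=
  let d : PySem.Dict (Int × Int) Int := PySem.Dict.ofList (source_range.map (fun t => ((t.1, t.2.1), t.2.2)))
  let dd := dest_range_maps.1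
  let ds := dest_range_maps.2.1
  let step := dest_range_maps.2.2
  let u := d.keys.foldl (fun u k =>
      let x := k.1
      let y := k.2
      if x ≥ ds + step ∨ y ≤ ds then
        u.insert (x, y) (d.getD (x, y) 0)
      else if ds ≤ x ∧ ds + step ≥ y then
        u.insert (x, y) (dd - ds)
      else if x < ds ∧ ds ≤ y ∧ y ≤ ds + step then
        (u.insert (x, ds) (d.getD (x, y) 0)).insert (ds, y) (dd - ds)
      else if ds ≤ x ∧ x < ds + step ∧ ds + step ≤ y then
        (u.insert (x, ds + step) (dd - ds)).insert (ds + step, y) (d.getD (x, y) 0)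
      else
        ((u.insert (x, ds) (d.getD (x, y) 0)).insert (ds, ds + step) (dd - ds)).insert (ds + step, y) (d.getD (x, y) 0))
    PySem.Dict.empty
  u.items.map (fun p => (p.1.1, p.1.2, p.2))

-- ===== PORT B =====
def update_the_range_alt (source_range : List (Int × Int × Int)) (dest_range_maps : Int × Int × Int) : List (Int × Int × Int) :=
  let d : PySem.Dict (Int × Int) Int := PySem.Dict.ofList (source_range.map (fun t => ((t.1, t.2.1), t.2.2)))
  let dd := dest_range_maps.1
  let ds := dest_range_maps.2.1
  let step := dest_range_maps.2.2
  let u := d.items.foldl (fun u kv =>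
      let x := kv.1.1
      let y := kv.1.2
      let v := kv.2
      if y ≤ ds ∨ ds + step ≤ x then
        u.insert (x, y) v
      else
        let cuts := x :: ([ds, ds + step].filter (fun p => decide (x < p ∧ p < y))) ++ [y]
        (cuts.zip cuts.tail).foldl (fun u ab =>
          u.insert (ab.1, ab.2) (if ds ≤ ab.1 ∧ ab.2 ≤ ds + step then dd - ds else v)) u)
    PySem.Dict.empty
  u.items.map (fun p => (p.1.1, p.1.2, p.2))

-- ===== PRECONDITION & SPEC =====
def Spec_update_the_range (source_range : List (Int × Int × Int)) (dest_range_maps : Int × Int × Int) (out : List (Int × Int × Int)) : Prop := out = update_the_range_alt source_range dest_range_maps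
instance (source_range : List (Int × Int × Int)) (dest_range_maps : Int × Int × Int) (out : List (Int × Int × Int)) : Decidable (Spec_update_the_range source_range dest_range_maps out) := by unfold Spec_update_the_range; infer_instance

-- ===== CLAIM (what is proved, stated in full; the proofs are below) =====
def Claim_equal_update_the_range : Prop := ∀ (source_range : List (Int × Int × Int)) (dest_range_maps : Int × Int × Int), Dom_update_the_range source_range dest_range_maps → Spec_update_the_range source_range dest_range_maps (update_the_range source_range dest_range_maps)

-- ===== LEMMAS AND PROOFS =====

-- One loop step of A (on a key k of d) equals one loop step of B (on the item (k, d.getD k 0)).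
theorem pv_step_eq (dd ds step : Int) (d : PySem.Dict (Int × Int) Int)
    (u : PySem.Dict (Int × Int) Int) (k : Int × Int) :
    (let x := k.1
     let y := k.2
     if x ≥ ds + step ∨ y ≤ ds then
       u.insert (x, y) (d.getD (x, y) 0)
     else if ds ≤ x ∧ ds + step ≥ y then
       u.insert (x, y) (dd - ds)
     else if x < ds ∧ ds ≤ y ∧ y ≤ ds + step then
       (u.insert (x, ds) (d.getD (x, y) 0)).insert (ds, y) (dd - ds)
     else if ds ≤ x ∧ x < ds + step ∧ ds + step ≤ y then
       (u.insert (x, ds + step) (dd - ds)).insert (ds + step, y) (d.getD (x, y) 0)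
     else
       ((u.insert (x, ds) (d.getD (x, y) 0)).insert (ds, ds + step) (dd - ds)).insert (ds + step, y) (d.getD (x, y) 0)) =
    (let x := k.1
     let y := k.2
     let v := d.getD k 0
     if y ≤ ds ∨ ds + step ≤ x then
       u.insert (x, y) v
     else
       let cuts := x :: ([ds, ds + step].filter (fun p => decide (x < p ∧ p < y))) ++ [y]
       (cuts.zip cuts.tail).foldl (fun u ab =>
         u.insert (ab.1, ab.2) (if ds ≤ ab.1 ∧ ab.2 ≤ ds + step then dd - ds else v)) u) := by
  obtain ⟨x, y⟩ := k
  simp only []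
  by_cases h1 : x ≥ ds + step ∨ y ≤ ds
  · have h1' : y ≤ ds ∨ ds + step ≤ x := by omega
    rw [if_pos h1, if_pos h1']
  · push_neg at h1
    obtain ⟨hx, hy⟩ := h1
    have h1a : ¬ (x ≥ ds + step ∨ y ≤ ds) := by omega
    have h1b : ¬ (y ≤ ds ∨ ds + step ≤ x) := by omega
    rw [if_neg h1a, if_neg h1b]
    by_cases h2 : ds ≤ x ∧ ds + step ≥ y
    · rw [if_pos h2]
      have e1 : (decide (x < ds ∧ ds < y)) = false := by simp; omega
      have e2 : (decide (x < ds + step ∧ ds + step < y)) = false := by simp; omega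
      simp only [List.filter, e1, e2, List.nil_append, List.cons_append, List.tail,
        List.zip, List.zipWith, List.foldl]
      rw [if_pos (show ds ≤ x ∧ y ≤ ds + step by omega)]
    · rw [if_neg h2]
      by_cases h3 : x < ds ∧ ds ≤ y ∧ y ≤ ds + step
      · rw [if_pos h3]
        have e1 : (decide (x < ds ∧ ds < y)) = true := by simp; omega
        have e2 : (decide (x < ds + step ∧ ds + step < y)) = false := by simp; omega
        simp only [List.filter, e1, e2, List.nil_append, List.cons_append, List.tail,
          List.zip, List.zipWith, List.foldl]
        rw [if_neg (show ¬ (ds ≤ x ∧ ds ≤ ds + step) by omega),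
            if_pos (show ds ≤ ds ∧ y ≤ ds + step by omega)]
      · rw [if_neg h3]
        by_cases h4 : ds ≤ x ∧ x < ds + step ∧ ds + step ≤ y
        · rw [if_pos h4]
          have hlt : ds + step < y := by omega
          have e1 : (decide (x < ds ∧ ds < y)) = false := by simp; omega
          have e2 : (decide (x < ds + step ∧ ds + step < y)) = true := by simp; omega
          simp only [List.filter, e1, e2, List.nil_append, List.cons_append, List.tail,
            List.zip, List.zipWith, List.foldl]
          rw [if_pos (show ds ≤ x ∧ ds + step ≤ ds + step by omega),
              if_neg (show ¬ (ds ≤ ds + step ∧ y ≤ ds + step) by omega)]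
        · rw [if_neg h4]
          have hxds : x < ds := by omega
          have hyds : ds + step < y := by omega
          have e1 : (decide (x < ds ∧ ds < y)) = true := by simp; omega
          have e2 : (decide (x < ds + step ∧ ds + step < y)) = true := by simp; omega
          simp only [List.filter, e1, e2, List.nil_append, List.cons_append, List.tail,
            List.zip, List.zipWith, List.foldl]
          rw [if_neg (show ¬ (ds ≤ x ∧ ds ≤ ds + step) by omega),
              if_pos (show ds ≤ ds ∧ ds + step ≤ ds + step by omega),
              if_neg (show ¬ (ds ≤ ds + step ∧ y ≤ ds + step) by omega)]

-- ===== VERDICT (by name: the statement is the Claim_ definition above) =====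
theorem update_the_range_spec : Claim_equal_update_the_range := by
  intro source_range dest_range_maps _
  unfold Spec_update_the_range update_the_range update_the_range_alt
  simp only []
  set d : PySem.Dict (Int × Int) Int := PySem.Dict.ofList (source_range.map (fun t => ((t.1, t.2.1), t.2.2))) with hd
  have hnd : d.keys.Nodup := hd ▸ PySem.Dict.nodup_keys_ofList _
  rw [PySem.Dict.items_eq_map_keys d hnd 0, List.foldl_map]
  congr 1
  congr 1
  apply List.foldl_ext
  intro u k _
  exact pv_step_eq _ _ _ d u k
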